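-- pv_equiv track=rewrite | github.com/Gabriel-CR/selecao_de_instrucoes | utils.py | turn_list
-- ===== SOURCE A (Python) =====
-- def turn_list(linearInstructions):
--     aux = ''
--     res = []
--     for i in linearInstructions:
--         if i == '(' or i == ')':
--             res.append(aux)
--             res.append(i)
--             aux = ''
--         elif i == ',':
--             res.append(aux)
--             aux = ''
--         else:
--             aux += i
--
--     res.append(aux)
--
--     # remove '' da lista
--     res = [i for i in res if i != '']
--
--     return res
-- ===== SOURCE B (Python) =====
-- import re
--
-- def turn_list(linearInstructions):
--     # Regex tokenization: the capturing group makes re.split emit each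
--     # '(' ')' ',' as its own element between the text pieces; then keep
--     # everything except empty pieces and the comma separators.
--     parts = re.split(r'([(),])', linearInstructions)
--     return [t for t in parts if t != '' and t != ',']
-- ===== Notes on version B (the rewrite author's own statement) =====
-- stated objective: idiomatic
-- what changed: Replaces the manual character-accumulator loop with re.split on a capturing delimiter class followed by a single filter comprehension.
import Mathlib
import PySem

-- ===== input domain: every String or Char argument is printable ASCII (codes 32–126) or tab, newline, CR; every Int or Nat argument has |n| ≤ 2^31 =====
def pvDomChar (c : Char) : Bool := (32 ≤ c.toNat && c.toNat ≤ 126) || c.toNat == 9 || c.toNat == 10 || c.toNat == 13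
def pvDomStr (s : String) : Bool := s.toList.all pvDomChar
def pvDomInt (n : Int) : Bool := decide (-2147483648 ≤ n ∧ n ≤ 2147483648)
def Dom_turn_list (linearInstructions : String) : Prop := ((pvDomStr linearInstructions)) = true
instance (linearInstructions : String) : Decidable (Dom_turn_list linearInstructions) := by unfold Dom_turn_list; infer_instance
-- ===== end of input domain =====

-- B replaces A's manual accumulator loop by a regex split-then-filter (idiomatic); equal return values proved for all strings.

-- ===== PORT A =====
-- A's for-loop over the characters, with accumulator `aux` and output `res`,
-- as structural recursion over the char list (aux kept as List Char, turned
-- into a String exactly where A appends it to res).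
def turnListLoop : List Char → List Char → List String → List Char × List String
  | [], aux, res => (aux, res)
  | i :: rest, aux, res =>
    if i = '(' ∨ i = ')' then turnListLoop rest [] (res ++ [String.ofList aux, String.ofList [i]])
    else if i = ',' then turnListLoop rest [] (res ++ [String.ofList aux])
    else turnListLoop rest (aux ++ [i]) res

def turn_list (linearInstructions : String) : List String :=
  let p := turnListLoop linearInstructions.toList [] []
  (p.2 ++ [String.ofList p.1]).filter (fun x => x ≠ "")

-- ===== PORT B =====
-- Hand port of re.split(r'([(),])', s): with a one-char capturing class the
-- regex split is exactly "cut at each delimiter, keeping the delimiter as its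
-- own piece, empty pieces included" — exact for this pattern.
def pvIsDelim (c : Char) : Bool := c = '(' || c = ')' || c = ','

def reSplitDelims : List Char → List (List Char)
  | [] => [[]]
  | c :: cs =>
    if pvIsDelim c then [] :: [c] :: reSplitDelims cs
    else
      match reSplitDelims cs with
      | p :: ps => (c :: p) :: ps
      | [] => [[c]]

def turn_list_alt (linearInstructions : String) : List String :=
  ((reSplitDelims linearInstructions.toList).map (fun p => String.ofList p)).filter
    (fun t => t ≠ "" && t ≠ ",")

-- ===== PRECONDITION & SPEC =====
def Spec_turn_list (linearInstructions : String) (out : List String) : Prop := out = turn_list_alt linearInstructions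
instance (linearInstructions : String) (out : List String) : Decidable (Spec_turn_list linearInstructions out) := by unfold Spec_turn_list; infer_instance

-- ===== CLAIM (what is proved, stated in full; the proofs are below) =====
def Claim_equal_turn_list : Prop := ∀ (linearInstructions : String), Dom_turn_list linearInstructions → Spec_turn_list linearInstructions (turn_list linearInstructions)

-- ===== LEMMAS AND PROOFS =====

-- prepend pending text to the first piece of the split
def consHead (aux : List Char) : List (List Char) → List (List Char)
  | [] => [aux]
  | p :: ps => (aux ++ p) :: ps

theorem reSplitDelims_ne_nil (cs : List Char) : reSplitDelims cs ≠ [] := by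
  cases cs with
  | nil => simp [reSplitDelims]
  | cons c cs =>
    simp only [reSplitDelims]
    split
    · simp
    · cases reSplitDelims cs <;> simp

theorem consHead_nil (l : List (List Char)) (h : l ≠ []) : consHead [] l = l := by
  cases l with
  | nil => exact absurd rfl h
  | cons p ps => simp [consHead]

theorem ofList_eq_comma_iff (l : List Char) : String.ofList l = "," ↔ l = [','] := by
  constructor
  · intro h
    have := congrArg String.toList h
    simpa using this
  · rintro rfl; rfl

-- A's filter (drop "") and B's filter (drop "" and ",") agree on comma-free lists
theorem filterAB (l : List String) (h : "," ∉ l) :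
    l.filter (fun x => x ≠ "") = l.filter (fun t => t ≠ "" && t ≠ ",") := by
  induction l with
  | nil => rfl
  | cons x xs ih =>
    have hx : x ≠ "," := fun hxx => h (hxx ▸ List.mem_cons_self)
    have hxs : "," ∉ xs := fun hm => h (List.mem_cons_of_mem _ hm)
    have htail := ih hxs
    by_cases he : x = "" <;> simp [he, hx] <;> simpa using htail

theorem main_invariant : ∀ (rest aux : List Char) (res : List String), aux ≠ [','] →
    ((turnListLoop rest aux res).2 ++ [String.ofList (turnListLoop rest aux res).1]).filter (fun x => x ≠ "")
      = res.filter (fun x => x ≠ "")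
        ++ ((consHead aux (reSplitDelims rest)).map (fun p => String.ofList p)).filter (fun t => t ≠ "" && t ≠ ",") := by
  intro rest
  induction rest with
  | nil =>
    intro aux res h
    have hauxc : String.ofList aux ≠ "," := fun hx => h ((ofList_eq_comma_iff aux).mp hx)
    have hb : "," ∉ [String.ofList aux] := by
      simp only [List.mem_singleton]
      exact fun hh => hauxc hh.symm
    simp only [turnListLoop, reSplitDelims, consHead, List.map, List.filter_append,
      List.append_nil]
    rw [filterAB [String.ofList aux] hb]
  | cons c cs ih =>
    intro aux res h
    have hauxc : String.ofList aux ≠ "," := fun hx => h ((ofList_eq_comma_iff aux).mp hx)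
    by_cases hp : c = '(' ∨ c = ')'
    · have hd : pvIsDelim c = true := by
        rcases hp with rfl | rfl <;> decide
      have hsplit : reSplitDelims (c :: cs) = [] :: [c] :: reSplitDelims cs := by
        simp [reSplitDelims, hd]
      have hb : "," ∉ [String.ofList aux, String.ofList [c]] := by
        have : String.ofList [c] ≠ "," := by
          rcases hp with rfl | rfl <;> decide
        simp only [List.mem_cons, not_or]
        exact ⟨fun hh => hauxc hh.symm, fun hh => this hh.symm, List.not_mem_nil⟩
      simp only [turnListLoop, if_pos hp]
      rw [ih [] _ (by simp), consHead_nil _ (reSplitDelims_ne_nil cs), hsplit]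
      simp only [consHead, List.append_nil, List.map, List.filter_append]
      rw [show (String.ofList aux :: String.ofList [c] ::
            List.map (fun p => String.ofList p) (reSplitDelims cs))
          = [String.ofList aux, String.ofList [c]]
            ++ List.map (fun p => String.ofList p) (reSplitDelims cs) from rfl]
      rw [List.filter_append, ← filterAB _ hb, List.append_assoc]
    · by_cases hc : c = ','
      · subst hc
        have hsplit : reSplitDelims (',' :: cs) = [] :: [','] :: reSplitDelims cs := by
          simp [reSplitDelims, pvIsDelim]
        simp only [turnListLoop, if_neg hp, ite_true]
        rw [ih [] _ (by simp), consHead_nil _ (reSplitDelims_ne_nil cs), hsplit]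
        simp only [consHead, List.append_nil, List.map, List.filter_append]
        rw [show (String.ofList aux :: String.ofList [','] ::
              List.map (fun p => String.ofList p) (reSplitDelims cs))
            = [String.ofList aux, String.ofList [',']]
              ++ List.map (fun p => String.ofList p) (reSplitDelims cs) from rfl]
        rw [List.filter_append, List.append_assoc]
        have hdrop : List.filter (fun t => t ≠ "" && t ≠ ",")
            [String.ofList aux, String.ofList [',']]
            = List.filter (fun t => t ≠ "" && t ≠ ",") [String.ofList aux] := by
          simp [List.filter_cons]
        rw [hdrop, ← filterAB [String.ofList aux]
          (by simp only [List.mem_singleton]; exact fun hh => hauxc hh.symm)]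
      · have hd : pvIsDelim c = false := by
          simp only [pvIsDelim, Bool.or_eq_false_iff, decide_eq_false_iff_not]
          exact ⟨⟨fun hx => hp (Or.inl hx), fun hx => hp (Or.inr hx)⟩, hc⟩
        have haux : aux ++ [c] ≠ [','] := by
          intro hx
          cases aux with
          | nil => simp at hx; exact hc hx
          | cons a as =>
            have := congrArg List.length hx
            simp at this
        obtain ⟨p, ps, hps⟩ : ∃ p ps, reSplitDelims cs = p :: ps := by
          cases hh : reSplitDelims cs with
          | nil => exact absurd hh (reSplitDelims_ne_nil cs)
          | cons p ps => exact ⟨p, ps, rfl⟩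
        have hsplit : reSplitDelims (c :: cs) = (c :: p) :: ps := by
          simp [reSplitDelims, hd, hps]
        simp only [turnListLoop, if_neg hp, if_neg hc]
        rw [ih (aux ++ [c]) res haux, hps, hsplit]
        simp [consHead]

-- ===== VERDICT (by name: the statement is the Claim_ definition above) =====
theorem turn_list_spec : Claim_equal_turn_list := by
  intro s _
  unfold Spec_turn_list turn_list turn_list_alt
  rw [main_invariant s.toList [] [] (by simp)]
  rw [consHead_nil _ (reSplitDelims_ne_nil s.toList)]
  simp
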